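-- pv_equiv track=rewrite | github.com/open-power/op-test | common/gen_python_string_funcs.py | rmunch
-- ===== SOURCE A (Python) =====
-- import string
--
-- def rmunch(buffer, charset=string.whitespace):
--
--   # Search a string buffer for a given character set. Return the portion of the
--   # string before and after the last instance of any character (or multiple
--   # characters) in that set. The default behavior is to munch on white space.
--   # This is basically strtok backwards but it returns the remainder too.
--
--   # First, we need to look for a starting point.
--   beginmark = -1
--   for i in range (len(buffer)-1,-1,-1):
--     if buffer[i] not in charset:
--       beginmark = i
--       break
--
--   # Is our string nothing but our delimiters?
--   if beginmark == -1:
--     return("","")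
--
--   # Now we start the string munching.
--   startmark = -1
--   endmark = -1
--
--   for i in range(beginmark,-1,-1):
--     if buffer[i] in charset:
--       endmark = i
--       break
--
--   # In case there are no instances of the character.
--   if endmark == -1:
--     return ("",buffer[:beginmark+1])
--
--   for i in range(endmark,-1,-1):
--     if buffer[i] not in charset:
--       startmark = i
--       break
--
--   # With our marks found, let's decide what to return.
--   if startmark == -1:
--     return ("",buffer[endmark+1:beginmark+1])
--
--   # Remaining string, then munched portion.
--   return (buffer[:startmark+1],buffer[endmark+1:beginmark+1])
-- ===== SOURCE B (Python) =====
-- import string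
--
-- def rmunch(buffer, charset=string.whitespace):
--   # One forward pass: maintain head / gap (delim run before token) / token /
--   # trail (delim run after token); A instead makes three backward index scans.
--   delims = set(charset)
--   head = gap = token = trail = ""
--   for c in buffer:
--     if c in delims:
--       if token:
--         trail += c
--       else:
--         gap += c
--     else:
--       if trail:
--         head, gap, token, trail = head + gap + token, trail, c, ""
--       else:
--         token += c
--   if not token:
--     return ("", "")
--   return (head, token)
-- ===== Notes on version B (the rewrite author's own statement) =====
-- stated objective: alternative
-- what changed: A makes three backward index scans over the buffer (last non-delimiter, then previous delimiter, then previous non-delimiter) and slices; B is a single forward pass folding each character into (head, gap, token, trail) accumulators and returns (head, token) at the end.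
import Mathlib
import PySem

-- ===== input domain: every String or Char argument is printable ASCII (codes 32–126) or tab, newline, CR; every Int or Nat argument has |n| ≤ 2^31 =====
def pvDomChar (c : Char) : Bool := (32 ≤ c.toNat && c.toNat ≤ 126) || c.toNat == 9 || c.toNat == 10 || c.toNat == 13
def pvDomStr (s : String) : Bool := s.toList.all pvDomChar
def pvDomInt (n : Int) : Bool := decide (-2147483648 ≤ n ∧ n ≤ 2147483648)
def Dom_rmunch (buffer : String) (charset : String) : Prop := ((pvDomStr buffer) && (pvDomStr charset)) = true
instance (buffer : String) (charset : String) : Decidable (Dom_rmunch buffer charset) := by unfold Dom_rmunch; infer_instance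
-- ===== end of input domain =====

-- B replaces A's three backward index scans by one forward fold maintaining
-- (head, gap, token, trail) accumulators (objective: alternative decomposition).

-- ===== PORT A =====
-- 'for i in range(k, -1, -1): if pred(buffer[i]): mark = i; break' — first index of the
-- countdown range whose character satisfies pred, else the sentinel -1 (the mark's initial value).
def rmunchFirst (l : List Char) (pred : Char → Bool) : List Int → Int
  | [] => -1
  | i :: rest => if pred (PySem.List.pyGetD l i ' ') then i else rmunchFirst l pred rest

def rmunch (buffer : String) (charset : String) : String × String :=
  let l := buffer.toList
  let cs := charset.toList
  let beginmark := rmunchFirst l (fun c => !(cs.contains c)) (PySem.List.pyRange ((l.length : Int) - 1) (-1) (-1))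
  if beginmark = -1 then ("", "")
  else
    let endmark := rmunchFirst l (fun c => cs.contains c) (PySem.List.pyRange beginmark (-1) (-1))
    if endmark = -1 then ("", String.ofList (PySem.List.slice l none (some (beginmark + 1))))
    else
      let startmark := rmunchFirst l (fun c => !(cs.contains c)) (PySem.List.pyRange endmark (-1) (-1))
      if startmark = -1 then
        ("", String.ofList (PySem.List.slice l (some (endmark + 1)) (some (beginmark + 1))))
      else
        (String.ofList (PySem.List.slice l none (some (startmark + 1))),
         String.ofList (PySem.List.slice l (some (endmark + 1)) (some (beginmark + 1))))

-- ===== PORT B =====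
-- loop body of Source B: state (head, gap, token, trail)
def rmunchStep (delims : List Char) (st : List Char × List Char × List Char × List Char) (c : Char) :
    List Char × List Char × List Char × List Char :=
  let (head, gap, token, trail) := st
  if delims.contains c then
    if token ≠ [] then (head, gap, token, trail ++ [c])
    else (head, gap ++ [c], token, trail)
  else
    if trail ≠ [] then (head ++ gap ++ token, trail, [c], [])
    else (head, gap, token ++ [c], trail)

def rmunch_alt (buffer : String) (charset : String) : String × String :=
  let delims := PySem.Set.ofList charset.toList
  let st := buffer.toList.foldl (rmunchStep delims) ([], [], [], [])
  if st.2.2.1 = [] then ("", "")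
  else (String.ofList st.1, String.ofList st.2.2.1)

-- ===== PRECONDITION & SPEC =====
def Spec_rmunch (buffer : String) (charset : String) (out : String × String) : Prop := out = rmunch_alt buffer charset
instance (buffer : String) (charset : String) (out : String × String) : Decidable (Spec_rmunch buffer charset out) := by unfold Spec_rmunch; infer_instance

-- ===== CLAIM (what is proved, stated in full; the proofs are below) =====
def Claim_equal_rmunch : Prop := ∀ (buffer : String) (charset : String), Dom_rmunch buffer charset → Spec_rmunch buffer charset (rmunch buffer charset)

-- ===== LEMMAS AND PROOFS =====
def revTake (p : Char → Bool) (xs : List Char) : List Char := (xs.reverse.takeWhile p).reverse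

theorem findFirst_congr (l1 l2 : List Char) (pred : Char → Bool) (idxs : List Int)
    (h : ∀ i ∈ idxs, PySem.List.pyGetD l1 i ' ' = PySem.List.pyGetD l2 i ' ') :
    rmunchFirst l1 pred idxs = rmunchFirst l2 pred idxs := by
  induction idxs with
  | nil => rfl
  | cons i rest ih =>
    simp only [rmunchFirst, h i (by simp)]
    rw [ih (fun j hj => h j (by simp [hj]))]

theorem findFirst_char (l : List Char) (pred : Char → Bool) :
    rmunchFirst l pred (PySem.List.pyRange ((l.length : Int) - 1) (-1) (-1)) =
      (l.length : Int) - 1 - ((revTake (fun c => !pred c) l).length : Int) := by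
  induction l using List.reverseRecOn with
  | nil => simp [revTake, PySem.List.pyRange_neg_one_eq_nil, rmunchFirst]
  | append_singleton l c ih =>
    have hlen : ((l ++ [c]).length : Int) - 1 = (l.length : Int) := by simp
    rw [hlen, PySem.List.pyRange_neg_one_cons (by omega)]
    have hget : PySem.List.pyGetD (l ++ [c]) (l.length : Int) ' ' = c := by
      simp [PySem.List.pyGetD_natCast, List.getD]
    by_cases hp : pred c
    · simp [rmunchFirst, hget, hp, revTake]
    · have hpc : pred c = false := by simpa using hp
      simp only [rmunchFirst, hget, hpc]
      rw [if_neg (by simp)]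
      have hcongr : rmunchFirst (l ++ [c]) pred (PySem.List.pyRange ((l.length : Int) - 1) (-1) (-1)) =
          rmunchFirst l pred (PySem.List.pyRange ((l.length : Int) - 1) (-1) (-1)) := by
        apply findFirst_congr
        intro i hi
        rw [PySem.List.mem_pyRange_neg_one] at hi
        have h0 : 0 ≤ i := by omega
        have hlt : i < (l.length : Int) := by omega
        rw [PySem.List.pyGetD_eq_getElem _ _ h0 (by simp; omega),
            PySem.List.pyGetD_eq_getElem _ _ h0 (by simpa using hlt)]
        rw [List.getElem_append_left]
      rw [hcongr, ih]
      have : revTake (fun c => !pred c) (l ++ [c]) = revTake (fun c => !pred c) l ++ [c] := by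
        simp [revTake, hpc]
      rw [this]
      simp
      omega

theorem findFirst_take (l : List Char) (pred : Char → Bool) (m : Nat) (hm : m ≤ l.length) :
    rmunchFirst l pred (PySem.List.pyRange ((m : Int) - 1) (-1) (-1)) =
      (m : Int) - 1 - ((revTake (fun c => !pred c) (l.take m)).length : Int) := by
  have hlen : ((l.take m).length : Int) - 1 = (m : Int) - 1 := by
    simp [List.length_take, Nat.min_eq_left hm]
  have hcongr : rmunchFirst l pred (PySem.List.pyRange ((m : Int) - 1) (-1) (-1)) =
      rmunchFirst (l.take m) pred (PySem.List.pyRange ((m : Int) - 1) (-1) (-1)) := by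
    apply findFirst_congr
    intro i hi
    rw [PySem.List.mem_pyRange_neg_one] at hi
    have h0 : 0 ≤ i := by omega
    rw [PySem.List.pyGetD_eq_getElem _ _ h0 (by omega),
        PySem.List.pyGetD_eq_getElem _ _ h0 (by simp [List.length_take]; omega)]
    rw [List.getElem_take]
  rw [hcongr, ← hlen, findFirst_char]

def revDrop (p : Char → Bool) (xs : List Char) : List Char := (xs.reverse.dropWhile p).reverse

def rmSpec (P : Char → Bool) (l : List Char) : List Char × List Char :=
  let s := revDrop P l
  let t := revTake (fun c => !P c) s
  let u := revDrop (fun c => !P c) s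
  if s = [] then ([], []) else (revDrop P u, t)

theorem revDrop_append_revTake (p : Char → Bool) (xs : List Char) :
    revDrop p xs ++ revTake p xs = xs := by
  have := List.takeWhile_append_dropWhile (p := p) (l := xs.reverse)
  simp [revDrop, revTake, ← List.reverse_append]

theorem length_revDrop_add (p : Char → Bool) (xs : List Char) :
    (revDrop p xs).length + (revTake p xs).length = xs.length := by
  have := congrArg List.length (revDrop_append_revTake p xs)
  simpa using this

theorem rmunch_eq_spec (buffer charset : String) :
    rmunch buffer charset =
      (String.ofList (rmSpec (fun c => charset.toList.contains c) buffer.toList).1,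
       String.ofList (rmSpec (fun c => charset.toList.contains c) buffer.toList).2) := by
  set l := buffer.toList with hl
  set cs := charset.toList with hcs
  set P : Char → Bool := fun c => cs.contains c with hP
  set Q : Char → Bool := fun c => !P c with hQ
  set s := revDrop P l with hs
  set t := revTake Q s with ht
  set u := revDrop Q s with hu
  set h := revDrop P u with hh
  have hnnP : (fun c => !(fun c => !cs.contains c) c) = P := by funext c; simp [hP]
  have hnnQ : (fun c => !(fun c => cs.contains c) c) = Q := by funext c; simp [hQ, hP]
  have hls : s.length + (revTake P l).length = l.length := by
    rw [hs]; exact length_revDrop_add P l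
  have hsu : u.length + t.length = s.length := by
    rw [hu, ht]; exact length_revDrop_add Q s
  have huh : h.length + (revTake P u).length = u.length := by
    rw [hh]; exact length_revDrop_add P u
  have hsl : s.length ≤ l.length := by omega
  have hul : u.length ≤ l.length := by omega
  have hspl : s ++ revTake P l = l := by rw [hs]; exact revDrop_append_revTake P l
  have hsut : u ++ t = s := by rw [hu, ht]; exact revDrop_append_revTake Q s
  have huhg : h ++ revTake P u = u := by rw [hh]; exact revDrop_append_revTake P u
  have hlu : u ++ (t ++ revTake P l) = l := by
    rw [← List.append_assoc, hsut, hspl]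
  have hlh : h ++ (revTake P u ++ (t ++ revTake P l)) = l := by
    rw [← List.append_assoc, huhg, hlu]
  have htkS : l.take s.length = s := by rw [← hspl]; exact List.take_left ..
  have htkU : l.take u.length = u := by rw [← hlu]; exact List.take_left ..
  have htkH : l.take h.length = h := by rw [← hlh]; exact List.take_left ..
  have htok : (l.drop u.length).take (s.length - u.length) = t := by
    rw [← hlu, List.drop_left, show s.length - u.length = t.length from by omega]
    exact List.take_left ..
  have hspecfold : rmSpec P l = if s = [] then ([], []) else (h, t) := by
    simp only [rmSpec]
    rw [← hs, ← hQ, ← hu, ← ht, ← hh]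
  simp only [rmunch]
  rw [← hl, ← hcs, findFirst_char, hnnP]
  have hb1 : (l.length : Int) - 1 - ((revTake P l).length : Int) = (s.length : Int) - 1 := by
    omega
  rw [hb1, hspecfold]
  by_cases hse : s = []
  · rw [if_pos (by simp [hse]), if_pos hse]
  · have hs0 : s.length ≠ 0 := fun e => hse (List.length_eq_zero_iff.mp e)
    rw [if_neg (by omega), if_neg hse]
    rw [findFirst_take l (fun c => cs.contains c) s.length hsl, hnnQ, htkS, ← ht]
    have hb2 : (s.length : Int) - 1 - (t.length : Int) = (u.length : Int) - 1 := by omega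
    rw [hb2]
    by_cases hue : u = []
    · have hu0 : u.length = 0 := by simp [hue]
      rw [if_pos (by omega)]
      rw [show (s.length : Int) - 1 + 1 = ((s.length : Nat) : Int) from by ring]
      rw [PySem.List.slice_to_natCast, htkS]
      have hhe : h = [] := by rw [hh, hue]; simp [revDrop]
      have hts : t = s := by rw [hue] at hsut; simpa using hsut
      simp [hhe, hts]
    · have hu0 : u.length ≠ 0 := fun e => hue (List.length_eq_zero_iff.mp e)
      rw [if_neg (by omega)]
      rw [findFirst_take l (fun c => !(cs.contains c)) u.length hul, hnnP, htkU]
      have hb3 : (u.length : Int) - 1 - ((revTake P u).length : Int) = (h.length : Int) - 1 := by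
        omega
      rw [hb3]
      rw [show (u.length : Int) - 1 + 1 = ((u.length : Nat) : Int) from by ring,
          show (s.length : Int) - 1 + 1 = ((s.length : Nat) : Int) from by ring]
      rw [PySem.List.slice_natCast, htok]
      by_cases hhe : h = []
      · rw [if_pos (by simp [hhe])]
        simp [hhe]
      · have hh0 : h.length ≠ 0 := fun e => hhe (List.length_eq_zero_iff.mp e)
        rw [if_neg (by omega)]
        rw [show (h.length : Int) - 1 + 1 = ((h.length : Nat) : Int) from by ring]
        rw [PySem.List.slice_to_natCast, htkH]

theorem revTake_of_revDrop_nil (p : Char → Bool) (xs : List Char) (h : revDrop p xs = []) :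
    revTake p xs = xs := by
  have := revDrop_append_revTake p xs
  rw [h] at this; simpa using this

theorem dropWhile_head_true (p : Char → Bool) (a : Char) (as : List Char)
    (h : List.dropWhile p (a :: as) = []) : p a = true := by
  by_contra hpa
  simp [Bool.not_eq_true] at hpa
  simp [hpa] at h

theorem revTake_neg_of_revDrop_nil (p : Char → Bool) (xs : List Char) (h : revDrop p xs = []) :
    revTake (fun c => !p c) xs = [] := by
  have hdw : List.dropWhile p xs.reverse = [] := by
    have := congrArg List.reverse h; simpa [revDrop] using this
  cases hxs : xs.reverse with
  | nil => simp [revTake, hxs]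
  | cons a as =>
    rw [hxs] at hdw
    have hpa := dropWhile_head_true p a as hdw
    simp [revTake, hxs, hpa]

theorem revDrop_neg_of_revDrop_nil (p : Char → Bool) (xs : List Char) (h : revDrop p xs = []) :
    revDrop (fun c => !p c) xs = xs := by
  have hdw : List.dropWhile p xs.reverse = [] := by
    have := congrArg List.reverse h; simpa [revDrop] using this
  cases hxs : xs.reverse with
  | nil =>
    have hx : xs = [] := by simpa using congrArg List.reverse hxs
    simp [revDrop, hx]
  | cons a as =>
    rw [hxs] at hdw
    have hpa := dropWhile_head_true p a as hdw
    have hstay : List.dropWhile (fun c => !p c) (a :: as) = a :: as := by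
      simp [hpa]
    rw [revDrop, hxs, hstay, ← hxs, List.reverse_reverse]

theorem takeWhile_head_true (p : Char → Bool) (a : Char) (as : List Char)
    (h : List.takeWhile p (a :: as) ≠ []) : p a = true := by
  by_contra hpa
  simp [Bool.not_eq_true] at hpa
  simp [hpa] at h

theorem revTake_neg_of_revTake_ne (p : Char → Bool) (xs : List Char) (h : revTake p xs ≠ []) :
    revTake (fun c => !p c) xs = [] := by
  have htw : List.takeWhile p xs.reverse ≠ [] := by
    intro e; exact h (by simp [revTake, e])
  cases hxs : xs.reverse with
  | nil => rw [hxs] at htw; simp at htw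
  | cons a as =>
    rw [hxs] at htw
    have hpa := takeWhile_head_true p a as htw
    simp [revTake, hxs, hpa]

theorem revDrop_neg_of_revTake_ne (p : Char → Bool) (xs : List Char) (h : revTake p xs ≠ []) :
    revDrop (fun c => !p c) xs = xs := by
  have htw : List.takeWhile p xs.reverse ≠ [] := by
    intro e; exact h (by simp [revTake, e])
  cases hxs : xs.reverse with
  | nil => rw [hxs] at htw; simp at htw
  | cons a as =>
    rw [hxs] at htw
    have hpa := takeWhile_head_true p a as htw
    have hstay : List.dropWhile (fun c => !p c) (a :: as) = a :: as := by
      simp [hpa]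
    rw [revDrop, hxs, hstay, ← hxs, List.reverse_reverse]

theorem revTake_not_of_revDrop_ne (p : Char → Bool) (xs : List Char) (h : revDrop p xs ≠ []) :
    revTake (fun c => !p c) (revDrop p xs) ≠ [] := by
  have hne : xs.reverse.dropWhile p ≠ [] := by
    intro e; exact h (by simp [revDrop, e])
  obtain ⟨a, as, heq⟩ := List.exists_cons_of_ne_nil hne
  have hpa : p a = false := by
    have := List.head_dropWhile_not p (l := xs.reverse) hne
    simpa [heq] using this
  simp [revTake, revDrop, heq, hpa]

theorem revTake_concat_pos (p : Char → Bool) (xs : List Char) (c : Char) (h : p c = true) :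
    revTake p (xs ++ [c]) = revTake p xs ++ [c] := by
  simp [revTake, h]

theorem revTake_concat_neg (p : Char → Bool) (xs : List Char) (c : Char) (h : p c = false) :
    revTake p (xs ++ [c]) = [] := by
  simp [revTake, h]

theorem revDrop_concat_pos (p : Char → Bool) (xs : List Char) (c : Char) (h : p c = true) :
    revDrop p (xs ++ [c]) = revDrop p xs := by
  simp [revDrop, h]

theorem revDrop_concat_neg (p : Char → Bool) (xs : List Char) (c : Char) (h : p c = false) :
    revDrop p (xs ++ [c]) = xs ++ [c] := by
  simp [revDrop, h]

theorem foldB_inv (ds : List Char) (l : List Char) :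
    l.foldl (rmunchStep ds) ([], [], [], []) =
      (if revDrop (fun c => ds.contains c) l = [] then ([], l, [], [])
       else (revDrop (fun c => ds.contains c)
               (revDrop (fun c => !ds.contains c) (revDrop (fun c => ds.contains c) l)),
             revTake (fun c => ds.contains c)
               (revDrop (fun c => !ds.contains c) (revDrop (fun c => ds.contains c) l)),
             revTake (fun c => !ds.contains c) (revDrop (fun c => ds.contains c) l),
             revTake (fun c => ds.contains c) l)) := by
  set P : Char → Bool := fun c => ds.contains c with hP
  set Q : Char → Bool := fun c => !ds.contains c with hQ
  have hPc : ∀ c, P c = ds.contains c := fun c => rfl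
  have hQc : ∀ c, Q c = !ds.contains c := fun c => rfl
  induction l using List.reverseRecOn with
  | nil => simp [revDrop]
  | append_singleton l c ih =>
    rw [List.foldl_append, ih]
    by_cases hc : ds.contains c = true
    · -- c is a delimiter
      have hc' : c ∈ ds := by simpa using hc
      rw [revDrop_concat_pos P l c (by rw [hPc]; exact hc),
          revTake_concat_pos P l c (by rw [hPc]; exact hc)]
      by_cases hse : revDrop P l = []
      · rw [if_pos hse, if_pos hse]
        simp [rmunchStep, hc']
      · have htne : revTake Q (revDrop P l) ≠ [] := by
          rw [hQ]; exact revTake_not_of_revDrop_ne P l hse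
        rw [if_neg hse, if_neg hse]
        simp [rmunchStep, hc', htne]
    · -- c is not a delimiter
      have hcf : ds.contains c = false := by simpa using hc
      have hcf' : c ∉ ds := by simpa using hcf
      rw [revDrop_concat_neg P l c (by rw [hPc]; exact hcf),
          revTake_concat_neg P l c (by rw [hPc]; exact hcf),
          revTake_concat_pos Q l c (by rw [hQc, hcf]; rfl),
          revDrop_concat_pos Q l c (by rw [hQc, hcf]; rfl)]
      rw [if_neg (show ¬(l ++ [c] = []) from by simp)]
      by_cases hse : revDrop P l = []
      · rw [if_pos hse]
        have h1 : revTake Q l = [] := by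
          rw [hQ]; exact revTake_neg_of_revDrop_nil P l hse
        have h2 : revDrop Q l = l := by
          rw [hQ]; exact revDrop_neg_of_revDrop_nil P l hse
        have h3 : revTake P l = l := revTake_of_revDrop_nil P l hse
        rw [h1, h2, h3, hse]
        simp [rmunchStep, hcf']
      · rw [if_neg hse]
        have htne : revTake Q (revDrop P l) ≠ [] := by
          rw [hQ]; exact revTake_not_of_revDrop_ne P l hse
        by_cases hre : revTake P l = []
        · -- no trailing delimiters: token grows
          have hsl : revDrop P l = l := by
            have := revDrop_append_revTake P l
            rw [hre] at this; simpa using this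
          have h1 : revTake Q l = revTake Q (revDrop P l) := by rw [hsl]
          have h2 : revDrop Q l = revDrop Q (revDrop P l) := by rw [hsl]
          rw [h1, h2, hre]
          simp [rmunchStep, hcf']
        · -- a trailing delimiter run: head absorbs gap and token, gap := run
          have h1 : revTake Q l = [] := by
            rw [hQ]; exact revTake_neg_of_revTake_ne P l hre
          have h2 : revDrop Q l = l := by
            rw [hQ]; exact revDrop_neg_of_revTake_ne P l hre
          have h3 : revDrop P (revDrop Q l) = revDrop P l := by rw [h2]
          have h4 : revTake P (revDrop Q l) = revTake P l := by rw [h2]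
          have hsplit : revDrop P (revDrop Q (revDrop P l)) ++ revTake P (revDrop Q (revDrop P l)) ++
              revTake Q (revDrop P l) = revDrop P l := by
            rw [revDrop_append_revTake P (revDrop Q (revDrop P l)),
                revDrop_append_revTake Q (revDrop P l)]
          rw [h1, h2]
          simp [rmunchStep, hcf', hre, hsplit]

theorem ofList_contains (cs : List Char) :
    (fun c => List.contains (PySem.Set.ofList cs) c) = (fun c => cs.contains c) := by
  funext c
  simp [PySem.Set.mem_ofList]

theorem rmunch_alt_eq_spec (buffer charset : String) :
    rmunch_alt buffer charset =
      (String.ofList (rmSpec (fun c => charset.toList.contains c) buffer.toList).1,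
       String.ofList (rmSpec (fun c => charset.toList.contains c) buffer.toList).2) := by
  set l := buffer.toList with hl
  set cs := charset.toList with hcs
  have hncc : (fun c => !List.contains (PySem.Set.ofList cs) c) = (fun c => !cs.contains c) := by
    funext c
    simp [PySem.Set.mem_ofList]
  simp only [rmunch_alt, ← hl, ← hcs]
  rw [foldB_inv, ofList_contains cs, hncc]
  simp only [rmSpec]
  by_cases hse : revDrop (fun c => cs.contains c) l = []
  · rw [if_pos hse, if_pos hse]
    dsimp only
    rw [if_pos rfl]
  · have htne : revTake (fun c => !cs.contains c) (revDrop (fun c => cs.contains c) l) ≠ [] := by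
      exact revTake_not_of_revDrop_ne (fun c => cs.contains c) l hse
    rw [if_neg hse, if_neg hse]
    dsimp only
    rw [if_neg htne]

-- ===== VERDICT (by name: the statement is the Claim_ definition above) =====
theorem rmunch_spec : Claim_equal_rmunch := by
  intro buffer charset _
  unfold Spec_rmunch
  rw [rmunch_eq_spec, rmunch_alt_eq_spec]
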